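-- pv_equiv track=rewrite | github.com/justkalpane/Shadow-Creator-OS-Phase_01 | scripts/generate_build_values_snapshot.py | _parse_decision_packets
-- ===== SOURCE A (Python) =====
-- def _parse_decision_packets(text: str) -> list[dict[str, str]]:
--     packets: list[dict[str, str]] = []
--     current: dict[str, str] | None = None
--     for raw_line in text.splitlines():
--         stripped = raw_line.strip()
--         if stripped.startswith("- packet_id:"):
--             if current:
--                 packets.append(current)
--             current = {"packet_id": stripped.split(":", 1)[1].strip()}
--         elif current is not None and ":" in stripped:
--             key, value = stripped.split(":", 1)
--             current[key.strip()] = value.strip()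
--     if current:
--         packets.append(current)
--     return packets
-- ===== SOURCE B (Python) =====
-- def _parse_decision_packets(text: str) -> list[dict[str, str]]:
--     # Phase 1: partition stripped lines into blocks, one per "- packet_id:" header;
--     # lines before the first header, and block lines without ':', are dropped here.
--     blocks: list[list[str]] = []
--     for raw_line in text.splitlines():
--         stripped = raw_line.strip()
--         if stripped.startswith("- packet_id:"):
--             blocks.append([stripped])
--         elif blocks and ":" in stripped:
--             blocks[-1].append(stripped)
--     # Phase 2: build each block's dict independently.
--     result: list[dict[str, str]] = []
--     for header, *rest in blocks:
--         packet = {"packet_id": header.split(":", 1)[1].strip()}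
--         for line in rest:
--             key, value = line.split(":", 1)
--             packet[key.strip()] = value.strip()
--         result.append(packet)
--     return result
-- ===== Notes on version B (the rewrite author's own statement) =====
-- stated objective: alternative
-- what changed: Replaces A's single interleaved scan with a current-dict accumulator by two independent phases: a partition pass grouping stripped lines into per-packet blocks (dropping pre-header lines and colon-less lines), then a per-block build mapping each block to its dict.
import Mathlib
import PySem

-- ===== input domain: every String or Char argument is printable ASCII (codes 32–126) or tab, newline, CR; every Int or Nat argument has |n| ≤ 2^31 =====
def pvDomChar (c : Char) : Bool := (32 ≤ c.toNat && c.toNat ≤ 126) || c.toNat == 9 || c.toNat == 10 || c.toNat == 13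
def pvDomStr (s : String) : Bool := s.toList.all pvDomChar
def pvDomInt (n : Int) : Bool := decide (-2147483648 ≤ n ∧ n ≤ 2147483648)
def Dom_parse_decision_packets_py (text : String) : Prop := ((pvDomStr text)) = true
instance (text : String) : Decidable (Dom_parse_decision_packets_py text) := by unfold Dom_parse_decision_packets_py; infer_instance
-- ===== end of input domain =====

-- B replaces A's single interleaved scan (a current-dict accumulator) by a partition pass into
-- per-packet blocks followed by an independent build of each block's dict (objective: alternative).

-- shared helper: s.split(":", 1) as (before, after); second component "" only when ':' not in s
def pvSplitColon1 (s : String) : String × String :=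
  match PySem.Str.splitMax? s ":" 1 with
  | some (a :: b :: _) => (a, b)
  | _ => (s, "")

-- ===== PORT A =====
def pvStepA (st : List (PySem.Dict String String) × Option (PySem.Dict String String))
    (raw_line : String) :
    List (PySem.Dict String String) × Option (PySem.Dict String String) :=
  let stripped := PySem.Str.strip raw_line
  if PySem.Str.startswith stripped "- packet_id:" then
    let packets :=
      match st.2 with
      | some cur => if cur.items = [] then st.1 else st.1 ++ [cur]   -- `if current:` (dict truthiness)
      | none => st.1
    (packets, some ((PySem.Dict.empty).insert "packet_id"
                      (PySem.Str.strip (pvSplitColon1 stripped).2)))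
  else
    match st.2 with
    | some cur =>
        if PySem.Str.isIn ":" stripped then
          let kv := pvSplitColon1 stripped
          (st.1, some (cur.insert (PySem.Str.strip kv.1) (PySem.Str.strip kv.2)))
        else st
    | none => st

def parse_decision_packets_py (text : String) : List (List (String × String)) :=
  let st := (PySem.Str.splitlines text).foldl pvStepA ([], none)
  (match st.2 with
   | some cur => if cur.items = [] then st.1 else st.1 ++ [cur]
   | none => st.1).map PySem.Dict.items

-- ===== PORT B =====
-- blocks[-1].append(s)
def pvAppendLast (blocks : List (List String)) (s : String) : List (List String) :=
  match blocks with
  | [] => []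
  | [b] => [b ++ [s]]
  | b :: rest => b :: pvAppendLast rest s

def pvStepB (blocks : List (List String)) (raw_line : String) : List (List String) :=
  let stripped := PySem.Str.strip raw_line
  if PySem.Str.startswith stripped "- packet_id:" then
    blocks ++ [[stripped]]
  else if blocks ≠ [] ∧ PySem.Str.isIn ":" stripped then
    pvAppendLast blocks stripped
  else
    blocks

def pvBuildPacket (block : List String) : PySem.Dict String String :=
  match block with
  | [] => PySem.Dict.empty     -- unreachable: every block starts with its header line
  | header :: rest =>
      rest.foldl
        (fun packet line =>
          let kv := pvSplitColon1 line
          packet.insert (PySem.Str.strip kv.1) (PySem.Str.strip kv.2))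
        ((PySem.Dict.empty).insert "packet_id" (PySem.Str.strip (pvSplitColon1 header).2))

def parse_decision_packets_py_alt (text : String) : List (List (String × String)) :=
  ((((PySem.Str.splitlines text).foldl pvStepB []).map pvBuildPacket).map PySem.Dict.items)

-- ===== PRECONDITION & SPEC =====
def Spec_parse_decision_packets_py (text : String) (out : List (List (String × String))) : Prop := out = parse_decision_packets_py_alt text
instance (text : String) (out : List (List (String × String))) : Decidable (Spec_parse_decision_packets_py text out) := by unfold Spec_parse_decision_packets_py; infer_instance

-- ===== CLAIM (what is proved, stated in full; the proofs are below) =====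
def Claim_equal_parse_decision_packets_py : Prop := ∀ (text : String), Dom_parse_decision_packets_py text → Spec_parse_decision_packets_py text (parse_decision_packets_py text)

-- ===== LEMMAS AND PROOFS =====

-- correspondence between A's (packets, current) state and B's block list
def pvRel (P : List (PySem.Dict String String)) (cur : Option (PySem.Dict String String))
    (blocks : List (List String)) : Prop :=
  match cur with
  | none => P = [] ∧ blocks = []
  | some c => ∃ bt bh, blocks = bt ++ [bh] ∧ bh ≠ [] ∧ pvBuildPacket bh = c ∧
      P = bt.map pvBuildPacket

theorem pv_items_insert_ne_nil (d : PySem.Dict String String) (k v : String) :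
    (d.insert k v).items ≠ [] := by
  rcases h : d.contains k with _ | _
  · rw [PySem.Dict.items_insert_of_not_contains d v h]; simp
  · rw [PySem.Dict.items_insert_of_contains d v h]
    intro hnil
    have hk := (PySem.Dict.contains_iff_mem_keys d k).mp h
    have hit : d.items = [] := List.map_eq_nil_iff.mp hnil
    simp [PySem.Dict.keys, hit] at hk

theorem pvBuildPacket_items_ne_nil (bh : List String) (h : bh ≠ []) :
    (pvBuildPacket bh).items ≠ [] := by
  cases bh with
  | nil => exact absurd rfl h
  | cons header rest =>
      simp only [pvBuildPacket]
      induction rest using List.reverseRecOn with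
      | nil => simpa using pv_items_insert_ne_nil _ _ _
      | append_singleton r x ih =>
          rw [List.foldl_append]
          exact pv_items_insert_ne_nil _ _ _

theorem pvAppendLast_append (bt : List (List String)) (bh : List String) (s : String) :
    pvAppendLast (bt ++ [bh]) s = bt ++ [bh ++ [s]] := by
  induction bt with
  | nil => rfl
  | cons b rest ih =>
      cases rest with
      | nil => simp [pvAppendLast]
      | cons x xs => simpa [pvAppendLast] using ih

theorem pvBuildPacket_snoc (h : String) (r : List String) (s : String) :
    pvBuildPacket ((h :: r) ++ [s]) =
      (pvBuildPacket (h :: r)).insert (PySem.Str.strip (pvSplitColon1 s).1)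
        (PySem.Str.strip (pvSplitColon1 s).2) := by
  simp [pvBuildPacket, List.foldl_append]

theorem pv_loop (lines : List String) :
    ∀ P cur blocks, pvRel P cur blocks →
      pvRel (lines.foldl pvStepA (P, cur)).1 (lines.foldl pvStepA (P, cur)).2
        (lines.foldl pvStepB blocks) := by
  induction lines with
  | nil => intro P cur blocks h; exact h
  | cons l rest ih =>
      intro P cur blocks h
      simp only [List.foldl_cons]
      by_cases hh : PySem.Chars.startswith (PySem.Chars.strip l.toList)
          ['-', ' ', 'p', 'a', 'c', 'k', 'e', 't', '_', 'i', 'd', ':'] = true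
      · -- header line: A flushes current, B opens a new block
        cases cur with
        | none =>
            obtain ⟨hP, hbk⟩ := h; subst hP hbk
            have hA : pvStepA ([], none) l =
                ([], some ((PySem.Dict.empty).insert "packet_id"
                  (PySem.Str.strip (pvSplitColon1 (PySem.Str.strip l)).2))) := by
              simp [pvStepA, hh]
            have hB : pvStepB [] l = [[PySem.Str.strip l]] := by
              simp [pvStepB, hh]
            rw [hA, hB]
            exact ih _ _ _ ⟨[], [PySem.Str.strip l], rfl, by simp, rfl, rfl⟩
        | some c =>
            obtain ⟨bt, bh, hbk, hne, hbuild, hP⟩ := h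
            have hitems : c.items ≠ [] := hbuild ▸ pvBuildPacket_items_ne_nil bh hne
            have hA : pvStepA (P, some c) l =
                (P ++ [c], some ((PySem.Dict.empty).insert "packet_id"
                  (PySem.Str.strip (pvSplitColon1 (PySem.Str.strip l)).2))) := by
              simp [pvStepA, hh, if_neg hitems]
            have hB : pvStepB blocks l = blocks ++ [[PySem.Str.strip l]] := by
              simp [pvStepB, hh]
            rw [hA, hB]
            refine ih _ _ _ ⟨bt ++ [bh], [PySem.Str.strip l], by simp [hbk], by simp, rfl, ?_⟩
            simp [hP, hbuild]
      · -- non-header line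
        cases cur with
        | none =>
            obtain ⟨hP, hbk⟩ := h; subst hP hbk
            have hA : pvStepA (([] : List (PySem.Dict String String)), none) l =
                ([], none) := by simp [pvStepA, hh]
            have hB : pvStepB [] l = [] := by simp [pvStepB, hh]
            rw [hA, hB]
            exact ih [] none [] ⟨rfl, rfl⟩
        | some c =>
            obtain ⟨bt, bh, hbk, hne, hbuild, hP⟩ := h
            by_cases hc : PySem.Chars.isIn [':'] (PySem.Chars.strip l.toList) = true
            · have hA : pvStepA (P, some c) l =
                  (P, some (c.insert (PySem.Str.strip (pvSplitColon1 (PySem.Str.strip l)).1)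
                    (PySem.Str.strip (pvSplitColon1 (PySem.Str.strip l)).2))) := by
                simp [pvStepA, hh, hc]
              have hnb : blocks ≠ [] := by simp [hbk]
              have hB : pvStepB blocks l = pvAppendLast blocks (PySem.Str.strip l) := by
                simp [pvStepB, hh, hc, hnb]
              rw [hA, hB]
              obtain ⟨h0, r, hr⟩ := List.exists_cons_of_ne_nil hne
              refine ih _ _ _ ⟨bt, bh ++ [PySem.Str.strip l],
                by simp [hbk, pvAppendLast_append], by simp, ?_, hP⟩
              rw [hr, pvBuildPacket_snoc, ← hr, hbuild]
            · have hA : pvStepA (P, some c) l = (P, some c) := by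
                simp [pvStepA, hh, hc]
              have hB : pvStepB blocks l = blocks := by
                simp [pvStepB, hh, hc]
              rw [hA, hB]
              exact ih P (some c) blocks ⟨bt, bh, hbk, hne, hbuild, hP⟩

-- ===== VERDICT (by name: the statement is the Claim_ definition above) =====
theorem parse_decision_packets_py_spec : Claim_equal_parse_decision_packets_py := by
  intro text _
  unfold Spec_parse_decision_packets_py parse_decision_packets_py parse_decision_packets_py_alt
  have h := pv_loop (PySem.Str.splitlines text) [] none [] ⟨rfl, rfl⟩
  set st := (PySem.Str.splitlines text).foldl pvStepA ([], none) with hst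
  set blocks := (PySem.Str.splitlines text).foldl pvStepB [] with hbl
  cases hcur : st.2 with
  | none =>
      rw [hcur] at h
      obtain ⟨hP, hb⟩ := h
      simp [hcur, hP, hb]
  | some c =>
      rw [hcur] at h
      obtain ⟨bt, bh, hb, hne, hbuild, hP⟩ := h
      have hitems : c.items ≠ [] := hbuild ▸ pvBuildPacket_items_ne_nil bh hne
      simp only [hcur, if_neg hitems]
      simp [hb, hP, hbuild]
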